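-- pv_equiv track=rewrite | github.com/bigdale123/CS103 | HW6/hw6.py | blazers
-- ===== SOURCE A (Python) =====
-- def blazers(n2):
--     retstring = ""
--     powers = []
--     for i in range(0,100):
--         powers.append(2**i)
--     for i in range(0,n2+1):
--         if i in powers:
--             retstring += "blazers"
--         else:
--             retstring += str(i)
--     return retstring
-- ===== SOURCE B (Python) =====
-- def blazers(n2):
--     parts = []
--     p = 1
--     for i in range(0, n2 + 1):
--         if i == p:
--             parts.append("blazers")
--             p *= 2
--         else:
--             parts.append(str(i))
--     return "".join(parts)
-- ===== Notes on version B (the rewrite author's own statement) =====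
-- stated objective: faster
-- what changed: B drops the precomputed powers-of-two table and its per-iteration linear membership scan, instead maintaining a running next-power-of-two counter compared by a single equality test, and joins collected pieces once instead of repeated string concatenation.
import Mathlib
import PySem

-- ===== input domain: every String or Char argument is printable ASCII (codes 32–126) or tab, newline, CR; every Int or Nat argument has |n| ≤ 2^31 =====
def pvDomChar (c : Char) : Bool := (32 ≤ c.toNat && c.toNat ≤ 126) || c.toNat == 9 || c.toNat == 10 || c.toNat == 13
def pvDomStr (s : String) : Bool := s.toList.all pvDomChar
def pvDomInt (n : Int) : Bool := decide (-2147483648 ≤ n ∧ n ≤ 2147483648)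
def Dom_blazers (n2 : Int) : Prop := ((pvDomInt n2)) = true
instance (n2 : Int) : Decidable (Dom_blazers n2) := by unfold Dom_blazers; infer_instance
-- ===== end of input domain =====

-- B replaces A's 100-entry powers-of-two table and its per-step membership scan by a running
-- next-power-of-two counter, collecting the pieces in a list joined once at the end.

-- ===== PORT A =====
def blazers (n2 : Int) : String :=
  -- powers = [2**i for i in range(0,100)]  (i ≥ 0 throughout this range, so 2**i = (2:Int)^i.toNat exactly)
  let powers : List Int :=
    (PySem.List.pyRange 0 100 1).foldl (fun acc i => acc ++ [(2:Int) ^ i.toNat]) []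
  (PySem.List.pyRange 0 (n2 + 1) 1).foldl
    (fun retstring i =>
      if powers.contains i then retstring ++ "blazers" else retstring ++ PySem.Int.toStr i) ""

-- ===== PORT B =====
def blazers_alt (n2 : Int) : String :=
  let st :=
    (PySem.List.pyRange 0 (n2 + 1) 1).foldl
      (fun st i =>
        if i == st.2 then (st.1 ++ ["blazers"], 2 * st.2)
        else (st.1 ++ [PySem.Int.toStr i], st.2))
      (([] : List String), (1 : Int))
  PySem.Str.join "" st.1

-- ===== PRECONDITION & SPEC =====
def Spec_blazers (n2 : Int) (out : String) : Prop := out = blazers_alt n2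
instance (n2 : Int) (out : String) : Decidable (Spec_blazers n2 out) := by unfold Spec_blazers; infer_instance

-- ===== CLAIM (what is proved, stated in full; the proofs are below) =====
def Claim_equal_blazers : Prop := ∀ (n2 : Int), Dom_blazers n2 → Spec_blazers n2 (blazers n2)

-- ===== LEMMAS AND PROOFS =====

-- A's powers table, named for the proofs
def pvPowers : List Int :=
  (PySem.List.pyRange 0 100 1).foldl (fun acc i => acc ++ [(2:Int) ^ i.toNat]) []

lemma pvPowers_eq : pvPowers = (List.range 100).map (fun k => (2:Int) ^ k) := by
  unfold pvPowers
  rw [PySem.List.foldl_append_singleton_eq_map, PySem.List.pyRange_one]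
  simp [List.map_map, Function.comp]

lemma mem_pvPowers {x : Int} : x ∈ pvPowers ↔ ∃ k < 100, x = (2:Int) ^ k := by
  rw [pvPowers_eq]
  simp [List.mem_map, eq_comm]

-- B's running power after processing 0,1,…,m-1
def pvNext : Nat → Int
  | 0 => 1
  | m + 1 => if (m : Int) = pvNext m then 2 * pvNext m else pvNext m

-- invariant: pvNext m is the least power of two ≥ m
lemma pvNext_inv : ∀ m : Nat, ∃ k : Nat,
    pvNext m = 2 ^ k ∧ (m : Int) ≤ 2 ^ k ∧ (m = 0 ∨ (2:Int) ^ k < 2 * m) := by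
  intro m
  induction m with
  | zero => exact ⟨0, rfl, by norm_num, Or.inl rfl⟩
  | succ m ih =>
    obtain ⟨k, hk, hle, hlt⟩ := ih
    have hpos : (0:Int) < 2 ^ k := pow_pos (by norm_num) k
    by_cases h : (m : Int) = pvNext m
    · have hm2 : (m:Int) = 2 ^ k := h.trans hk
      refine ⟨k + 1, ?_, ?_, Or.inr ?_⟩
      · show pvNext (m + 1) = 2 ^ (k + 1)
        simp only [pvNext]
        rw [if_pos h, hk, pow_succ]; ring
      · rw [pow_succ]; push_cast; omega
      · rw [pow_succ]; push_cast; omega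
    · have hne : (m:Int) ≠ 2 ^ k := fun hh => h (hh.trans hk.symm)
      refine ⟨k, ?_, ?_, Or.inr ?_⟩
      · show pvNext (m + 1) = 2 ^ k
        simp only [pvNext]
        rw [if_neg h, hk]
      · push_cast; omega
      · rcases hlt with h0 | hlt
        · subst h0
          have h1 : (1:Int) = 2 ^ k := hk
          push_cast; omega
        · push_cast at hlt ⊢; omega

-- the two loop tests agree pointwise on values that fit the domain
lemma contains_eq_next (m : Nat) (hm : m ≤ 2 ^ 31) :
    pvPowers.contains (m : Int) = ((m : Int) == pvNext m) := by
  obtain ⟨k, hk, hle, hlt⟩ := pvNext_inv m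
  cases hc : pvPowers.contains (m : Int) with
  | true =>
    symm; rw [beq_iff_eq]
    have hmem : ((m : Int)) ∈ pvPowers := by simpa using hc
    rw [mem_pvPowers] at hmem
    obtain ⟨j, hj100, hj⟩ := hmem
    have hjpos : (0:Int) < 2 ^ j := pow_pos (by norm_num) j
    have hm0 : m ≠ 0 := by
      intro h0; subst h0
      simp only [Nat.cast_zero] at hj
      omega
    rcases hlt with h0 | hlt
    · exact absurd h0 hm0
    have hjk : j = k := by
      have h1 : (2:Int) ^ j ≤ 2 ^ k := by rw [← hj]; exact hle
      have h2 : (2:Int) ^ k < 2 ^ (j + 1) := by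
        rw [pow_succ]
        have : (2:Int) ^ j * 2 = 2 * m := by rw [hj]; ring
        omega
      rcases lt_trichotomy j k with hq | hq | hq
      · exfalso
        have : (2:Int) ^ (j + 1) ≤ 2 ^ k := pow_le_pow_right₀ (by norm_num) (by omega)
        omega
      · exact hq
      · exfalso
        have : (2:Int) ^ k < 2 ^ j := pow_lt_pow_right₀ (by norm_num) hq
        omega
    rw [hj, hjk, hk]
  | false =>
    symm; rw [beq_eq_false_iff_ne]
    intro heq
    have hk31 : k ≤ 31 := by
      by_contra hgt
      have hbig : (2:Int) ^ 32 ≤ 2 ^ k := pow_le_pow_right₀ (by norm_num) (by omega)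
      have hmk : (m : Int) = 2 ^ k := heq.trans hk
      have h2 : (m : Int) ≤ 2 ^ 31 := by exact_mod_cast hm
      have e1 : (2:Int) ^ 31 = 2147483648 := by norm_num
      have e2 : (2:Int) ^ 32 = 4294967296 := by norm_num
      omega
    have hmem : ((m : Int)) ∈ pvPowers := by
      rw [mem_pvPowers]
      exact ⟨k, by omega, heq.trans hk⟩
    simp [hmem] at hc

-- "".join distributes over snoc
lemma flatten_intersperse_nil {α : Type} (L : List (List α)) :
    (List.intersperse ([] : List α) L).flatten = L.flatten := by
  induction L with
  | nil => rfl
  | cons a L ih =>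
    cases L with
    | nil => simp
    | cons b L => simp [List.intersperse_cons₂] at ih ⊢; simpa using ih

lemma join_snoc (l : List String) (x : String) :
    PySem.Str.join "" (l ++ [x]) = PySem.Str.join "" l ++ x := by
  apply String.toList_inj.mp
  simp [PySem.Str.toList_join, PySem.Chars.join, List.intercalate, flatten_intersperse_nil]

-- the two folds over 0,…,m-1
def pvFB (m : Nat) : List String × Int :=
  ((List.range m).map Int.ofNat).foldl
    (fun st i =>
      if i == st.2 then (st.1 ++ ["blazers"], 2 * st.2)
      else (st.1 ++ [PySem.Int.toStr i], st.2))
    ([], 1)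

def pvFA (m : Nat) : String :=
  ((List.range m).map Int.ofNat).foldl
    (fun retstring i =>
      if pvPowers.contains i then retstring ++ "blazers" else retstring ++ PySem.Int.toStr i) ""

lemma pvFB_succ (m : Nat) :
    pvFB (m + 1) =
      if (m : Int) == (pvFB m).2 then ((pvFB m).1 ++ ["blazers"], 2 * (pvFB m).2)
      else ((pvFB m).1 ++ [PySem.Int.toStr (m : Int)], (pvFB m).2) := by
  unfold pvFB
  rw [List.range_succ, List.map_append, List.foldl_append]
  rfl

set_option maxRecDepth 2000 in
lemma pvFA_succ (m : Nat) :
    pvFA (m + 1) =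
      if pvPowers.contains (m : Int) then pvFA m ++ "blazers"
      else pvFA m ++ PySem.Int.toStr (m : Int) := by
  unfold pvFA
  rw [List.range_succ, List.map_append, List.foldl_append]
  rfl

lemma pv_main : ∀ m : Nat, m ≤ 2 ^ 31 + 1 →
    (pvFB m).2 = pvNext m ∧ PySem.Str.join "" (pvFB m).1 = pvFA m := by
  intro m
  induction m with
  | zero => intro _; constructor <;> rfl
  | succ m ih =>
    intro hm
    obtain ⟨ih2, ih1⟩ := ih (by omega)
    have hcont := contains_eq_next m (by omega)
    constructor
    · rw [pvFB_succ, ih2]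
      by_cases h : (m : Int) = pvNext m
      · simp [pvNext, h]
      · simp [pvNext, h]
    · rw [pvFB_succ, pvFA_succ, ih2, hcont]
      by_cases h : (m : Int) = pvNext m
      · simp [h, join_snoc, ih1]
      · simp [h, join_snoc, ih1]

-- ===== VERDICT (by name: the statement is the Claim_ definition above) =====
theorem blazers_spec : Claim_equal_blazers := by
  intro n2 hdom
  have hn : n2 ≤ 2147483648 := by
    unfold Dom_blazers pvDomInt at hdom
    simp only [decide_eq_true_eq] at hdom
    exact hdom.2
  show blazers n2 = blazers_alt n2
  have hrange : PySem.List.pyRange 0 (n2 + 1) 1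
      = (List.range ((n2 + 1) - 0).toNat).map Int.ofNat := by
    rw [PySem.List.pyRange_one]
    simp only [zero_add]
    rfl
  have hm : ((n2 + 1) - 0).toNat ≤ 2 ^ 31 + 1 := by
    have e1 : (2:Nat) ^ 31 = 2147483648 := by norm_num
    omega
  obtain ⟨_, hjoin⟩ := pv_main ((n2 + 1) - 0).toNat hm
  unfold blazers blazers_alt
  rw [hrange]
  exact hjoin.symm
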